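-- pv_equiv track=rewrite | github.com/hearer1913/- | Client.py | check_combination
-- ===== SOURCE A (Python) =====
-- def check_combination(dice_values):
--     # Сортируем кости
--     if 0 in dice_values:
--         return None
--     sorted_dice = sorted(dice_values)
--     # Проверяем наличие покера (все кости одного достоинства)
--     if len(set(sorted_dice)) == 1:
--         return "Покер"
--     # Проверяем наличие каре (четыре кости одного достоинства)
--     if len(set(sorted_dice)) == 2:
--         for value in set(sorted_dice):
--             if sorted_dice.count(value) == 4:
--                 return "Каре"
--     # Проверяем наличие фул-хауса (пары и сет костей разных достоинств)
--     if len(set(sorted_dice)) == 2: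
--         for value in set(sorted_dice):
--             if sorted_dice.count(value) == 3:
--                 return "Фул-хаус"
--     # Проверяем наличие большого стрейта (все кости разного достоинства в последовательности от 2 до 6)
--     if sorted_dice == [2, 3, 4, 5, 6]:
--         return "Большой стрейт"
--     # Проверяем наличие малого стрейта (все кости разного достоинства в последовательности от 1 до 5)
--     if sorted_dice == [1, 2, 3, 4, 5]:
--         return "Малый стрейт"
--     # Проверяем наличие сета (три кости одного достоинства)
--     if len(set(sorted_dice)) == 3:
--         for value in set(sorted_dice):
--             if sorted_dice.count(value) == 3:
--                 return "Сет"
--     # Проверяем наличие двух пар (две пары костей одного достоинства каждая)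
--     if len(set(sorted_dice)) == 3:
--         return "Две пары"
--     # Проверяем наличие пары (две кости одного достоинства)
--     if len(set(sorted_dice)) == 4:
--         return "Пара"
--     # Если ничего не подходит, то возвращаем "Ничего"
--     return "Ничего"
-- ===== SOURCE B (Python) =====
-- def _runs(s):
--     # lengths of the maximal blocks of equal adjacent values in s
--     runs = []
--     i = 0
--     n = len(s)
--     while i < n:
--         j = i + 1
--         while j < n and s[j] == s[i]:
--             j += 1
--         runs.append(j - i)
--         i = j
--     return runs
--
--
-- def check_combination(dice_values):
--     if 0 in dice_values:
--         return None
--     s = sorted(dice_values)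
--     runs = _runs(s)
--     k = len(runs)
--     if k == 1:
--         return "Покер"
--     if k == 2:
--         if 4 in runs:
--             return "Каре"
--         if 3 in runs:
--             return "Фул-хаус"
--         return "Ничего"
--     if k == 3:
--         return "Сет" if 3 in runs else "Две пары"
--     if k == 4:
--         return "Пара"
--     if s == [2, 3, 4, 5, 6]:
--         return "Большой стрейт"
--     if s == [1, 2, 3, 4, 5]:
--         return "Малый стрейт"
--     return "Ничего"
-- ===== Notes on version B (the rewrite author's own statement) =====
-- stated objective: alternative
-- what changed: A repeatedly rebuilds set(sorted_dice) and rescans the list with count() in each branch; B never builds a set or counts: it sorts once, computes the run lengths of equal adjacent values by a single recursive scan, and dispatches on the number of runs and on membership of 3/4 among them, checking straights only when no value repeats.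
import Mathlib
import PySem

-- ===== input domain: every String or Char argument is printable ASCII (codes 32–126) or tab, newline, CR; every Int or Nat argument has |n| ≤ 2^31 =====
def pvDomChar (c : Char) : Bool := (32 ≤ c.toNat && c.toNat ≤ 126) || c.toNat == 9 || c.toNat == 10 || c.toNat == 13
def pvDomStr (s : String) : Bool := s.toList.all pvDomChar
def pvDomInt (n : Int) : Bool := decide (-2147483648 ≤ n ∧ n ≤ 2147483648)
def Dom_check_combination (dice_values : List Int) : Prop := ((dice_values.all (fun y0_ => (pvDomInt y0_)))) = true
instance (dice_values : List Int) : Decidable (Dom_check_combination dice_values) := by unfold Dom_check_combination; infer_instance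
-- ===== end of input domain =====

-- B replaces A's repeated set()/count() scans by one sort, one recursive run-length
-- scan of equal adjacent values, and a single dispatch (objective: alternative).

-- ===== PORT A =====
def check_combination (dice_values : List Int) : Option String :=
  if dice_values.contains 0 then none
  else
    let sorted_dice := PySem.List.sorted dice_values (fun x => x) false
    if PySem.Set.len (PySem.Set.ofList sorted_dice) == 1 then some "Покер"
    else if PySem.Set.len (PySem.Set.ofList sorted_dice) == 2 &&
        (PySem.Set.ofList sorted_dice).any (fun v => PySem.List.count sorted_dice v == 4) then
      some "Каре"
    else if PySem.Set.len (PySem.Set.ofList sorted_dice) == 2 &&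
        (PySem.Set.ofList sorted_dice).any (fun v => PySem.List.count sorted_dice v == 3) then
      some "Фул-хаус"
    else if sorted_dice == [2, 3, 4, 5, 6] then some "Большой стрейт"
    else if sorted_dice == [1, 2, 3, 4, 5] then some "Малый стрейт"
    else if PySem.Set.len (PySem.Set.ofList sorted_dice) == 3 &&
        (PySem.Set.ofList sorted_dice).any (fun v => PySem.List.count sorted_dice v == 3) then
      some "Сет"
    else if PySem.Set.len (PySem.Set.ofList sorted_dice) == 3 then some "Две пары"
    else if PySem.Set.len (PySem.Set.ofList sorted_dice) == 4 then some "Пара"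
    else some "Ничего"

-- ===== PORT B =====
-- Source B's _runs: the outer while loop, one iteration per run, becomes structural
-- recursion on the remaining suffix; the inner scan j advancing over equal values
-- is the takeWhile, and the next iteration starts at i = j (the dropWhile suffix).
def pvRuns (s : List Int) : List Int :=
  match s with
  | [] => []
  | a :: t =>
      (((t.takeWhile (fun x => x == a)).length : Int) + 1) ::
        pvRuns (t.dropWhile (fun x => x == a))
termination_by s.length
decreasing_by
  simpa using Nat.lt_succ_of_le (List.length_dropWhile_le _ _)

def check_combination_alt (dice_values : List Int) : Option String :=
  if dice_values.contains 0 then none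
  else
    let s := PySem.List.sorted dice_values (fun x => x) false
    let runs := pvRuns s
    let k := runs.length
    if k == 1 then some "Покер"
    else if k == 2 then
      if runs.contains 4 then some "Каре"
      else if runs.contains 3 then some "Фул-хаус"
      else some "Ничего"
    else if k == 3 then
      if runs.contains 3 then some "Сет" else some "Две пары"
    else if k == 4 then some "Пара"
    else if s == [2, 3, 4, 5, 6] then some "Большой стрейт"
    else if s == [1, 2, 3, 4, 5] then some "Малый стрейт"
    else some "Ничего"

-- ===== PRECONDITION & SPEC =====
def Spec_check_combination (dice_values : List Int) (out : Option String) : Prop := out = check_combination_alt dice_values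
instance (dice_values : List Int) (out : Option String) : Decidable (Spec_check_combination dice_values out) := by unfold Spec_check_combination; infer_instance

-- ===== CLAIM (what is proved, stated in full; the proofs are below) =====
def Claim_equal_check_combination : Prop := ∀ (dice_values : List Int), Dom_check_combination dice_values → Spec_check_combination dice_values (check_combination dice_values)

-- ===== LEMMAS AND PROOFS =====

-- set(sorted(xs)) and set(xs) are permutations of each other
theorem pv_setA_perm_setB (xs : List Int) :
    (PySem.Set.ofList (PySem.List.sorted xs (fun x => x) false)).Perm (PySem.Set.ofList xs) := by
  rw [List.perm_ext_iff_of_nodup (PySem.Set.nodup_ofList _) (PySem.Set.nodup_ofList _)]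
  intro a
  simp [PySem.Set.mem_ofList, PySem.List.mem_sorted]

theorem pv_len_eq (xs : List Int) :
    (PySem.Set.ofList (PySem.List.sorted xs (fun x => x) false)).length
      = (PySem.Set.ofList xs).length :=
  (pv_setA_perm_setB xs).length_eq

theorem pv_anyA (xs : List Int) (c : Nat) :
    ((PySem.Set.ofList (PySem.List.sorted xs (fun x => x) false)).any
        (fun v => PySem.List.count (PySem.List.sorted xs (fun x => x) false) v == c) = true)
      ↔ ∃ x ∈ xs, List.count x xs = c := by
  simp only [List.any_eq_true, PySem.List.count_eq,
    (PySem.List.sorted_perm xs (fun x => x) false).count_eq,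
    PySem.Set.mem_ofList, PySem.List.mem_sorted, beq_iff_eq]

-- for a ≤-sorted list, the run lengths are exactly the multiplicities:
-- their number is the number of distinct values and a value c occurs among
-- them iff some element has multiplicity c.
theorem pv_runs_spec (s : List Int) (hs : s.Pairwise (· ≤ ·)) :
    (pvRuns s).length = s.toFinset.card ∧
      ∀ c : Int, c ∈ pvRuns s ↔ ∃ x ∈ s, (List.count x s : Int) = c := by
  induction s using pvRuns.induct with
  | case1 => simp [pvRuns]
  | case2 a t ih =>
    set t1 := t.takeWhile (fun x => x == a) with ht1def
    set t2 := t.dropWhile (fun x => x == a) with ht2def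
    have hsplit : t1 ++ t2 = t := List.takeWhile_append_dropWhile
    have ht1a : ∀ x ∈ t1, x = a := by
      intro x hx
      have := List.mem_takeWhile_imp hx
      simpa using this
    have hat : ∀ x ∈ t, a ≤ x := by
      intro x hx; exact (List.pairwise_cons.mp hs).1 x hx
    have ht2lt : ∀ x ∈ t2, a < x := by
      intro x hx
      rcases h2 : t2 with _ | ⟨b, u⟩
      · simp [h2] at hx
      · have hb : ¬ (b == a) = true := by
          have := List.head_dropWhile_not (fun x => x == a) (l := t)
          simp only [← ht2def, h2] at this
          simpa using this (by simp)
        have hbne : b ≠ a := by simpa using hb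
        have hbt : b ∈ t := by
          have : b ∈ t2 := by simp [h2]
          exact (hsplit ▸ (List.mem_append.mpr (Or.inr this)))
        have hab : a < b := lt_of_le_of_ne (hat b hbt) (Ne.symm hbne)
        rw [h2] at hx
        rcases List.mem_cons.mp hx with rfl | hxu
        · exact hab
        · have hp2 : t2.Pairwise (· ≤ ·) :=
            List.Pairwise.sublist (List.dropWhile_sublist _) (List.pairwise_cons.mp hs).2
          have : b ≤ x := by
            rw [h2] at hp2
            exact (List.pairwise_cons.mp hp2).1 x hxu
          exact lt_of_lt_of_le hab this
    have hant2 : a ∉ t2 := fun h => absurd (ht2lt a h) (lt_irrefl a)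
    have hp2 : t2.Pairwise (· ≤ ·) :=
      List.Pairwise.sublist (List.dropWhile_sublist _) (List.pairwise_cons.mp hs).2
    obtain ⟨ihlen, ihmem⟩ := ih hp2
    -- count of a in the whole list
    have hca : List.count a (a :: t) = t1.length + 1 := by
      have h1 : List.count a t1 = t1.length := by
        rw [List.count_eq_length]
        intro x hx; exact ((ht1a x hx) ▸ rfl)
      have h2 : List.count a t2 = 0 := List.count_eq_zero.mpr hant2
      rw [← hsplit]
      simp [h1, h2]
    -- counts of elements of t2 ignore the a-prefix
    have hcx : ∀ x ∈ t2, List.count x (a :: t) = List.count x t2 := by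
      intro x hx
      have hxa : x ≠ a := fun h => absurd (ht2lt x hx) (by simp [h])
      have h1 : List.count x t1 = 0 := by
        rw [List.count_eq_zero]
        intro hmem; exact hxa (ht1a x hmem)
      rw [← hsplit]
      simp [h1, Ne.symm hxa]
    have hfin : (a :: t).toFinset = insert a t2.toFinset := by
      rw [← hsplit]
      ext x
      simp only [List.toFinset_cons, List.toFinset_append, Finset.mem_insert,
        Finset.mem_union, List.mem_toFinset]
      constructor
      · rintro (rfl | hx1 | hx2)
        · exact Or.inl rfl
        · exact Or.inl (ht1a x hx1)
        · exact Or.inr hx2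
      · rintro (rfl | hx2)
        · exact Or.inl rfl
        · exact Or.inr (Or.inr hx2)
    constructor
    · rw [pvRuns, hfin, Finset.card_insert_of_notMem (by simpa using hant2)]
      simp [← ht1def, ← ht2def, ihlen]
    · intro c
      rw [pvRuns]
      simp only [← ht1def, ← ht2def, List.mem_cons]
      constructor
      · rintro (rfl | hc)
        · exact ⟨a, Or.inl rfl, by rw [hca]; push_cast; ring⟩
        · obtain ⟨x, hx, hcnt⟩ := ihmem c |>.mp hc
          refine ⟨x, Or.inr (hsplit ▸ List.mem_append.mpr (Or.inr hx)), ?_⟩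
          rw [hcx x hx]; exact hcnt
      · rintro ⟨x, hx, hcnt⟩
        rcases hx with rfl | hxt
        · left; rw [hca] at hcnt; push_cast at hcnt ⊢; omega
        · rcases (List.mem_append.mp (hsplit ▸ hxt)) with hx1 | hx2
          · left
            have := ht1a x hx1
            subst this
            rw [hca] at hcnt; push_cast at hcnt ⊢; omega
          · right
            exact (ihmem c).mpr ⟨x, hx2, by rw [← hcx x hx2]; exact hcnt⟩

-- bridge to the original list: number of runs of sorted(xs) = |set(xs)|
theorem pv_runs_len (xs : List Int) :
    (pvRuns (PySem.List.sorted xs (fun x => x) false)).length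
      = (PySem.Set.ofList xs).length := by
  have hs : (PySem.List.sorted xs (fun x => x) false).Pairwise (· ≤ ·) := by
    simpa using PySem.List.sorted_pairwise xs (fun x => x)
  rw [(pv_runs_spec _ hs).1]
  have h1 : (PySem.List.sorted xs (fun x => x) false).toFinset = xs.toFinset := by
    ext x; simp [PySem.List.mem_sorted]
  have h2 : (PySem.Set.ofList xs).toFinset = xs.toFinset := by
    ext x; simp [PySem.Set.mem_ofList]
  rw [h1, ← h2, List.toFinset_card_of_nodup (PySem.Set.nodup_ofList xs)]

-- membership of c among the runs of sorted(xs) = some value has multiplicity c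
theorem pv_runs_mem (xs : List Int) (c : Nat) :
    ((pvRuns (PySem.List.sorted xs (fun x => x) false)).contains (c : Int) = true)
      ↔ ∃ x ∈ xs, List.count x xs = c := by
  have hs : (PySem.List.sorted xs (fun x => x) false).Pairwise (· ≤ ·) := by
    simpa using PySem.List.sorted_pairwise xs (fun x => x)
  rw [List.contains_eq_mem, decide_eq_true_iff, (pv_runs_spec _ hs).2 (c : Int)]
  constructor
  · rintro ⟨x, hx, hcnt⟩
    refine ⟨x, (PySem.List.mem_sorted _ _ _ _).mp hx, ?_⟩
    rw [(PySem.List.sorted_perm xs (fun x => x) false).count_eq] at hcnt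
    exact_mod_cast hcnt
  · rintro ⟨x, hx, hcnt⟩
    refine ⟨x, (PySem.List.mem_sorted _ _ _ _).mpr hx, ?_⟩
    rw [(PySem.List.sorted_perm xs (fun x => x) false).count_eq]
    exact_mod_cast congrArg (Nat.cast : Nat → Int) hcnt

-- ===== VERDICT (by name: the statement is the Claim_ definition above) =====
set_option maxHeartbeats 1000000 in
theorem check_combination_spec : Claim_equal_check_combination := by
  intro xs _
  show check_combination xs = check_combination_alt xs
  unfold check_combination check_combination_alt
  by_cases h0 : xs.contains 0 = true
  · rw [if_pos h0, if_pos h0]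
  · rw [if_neg h0, if_neg h0]
    simp only []
    have hlenA : PySem.Set.len (PySem.Set.ofList (PySem.List.sorted xs (fun x => x) false))
        = ((PySem.Set.ofList xs).length : Int) := by
      simp [PySem.Set.len, pv_len_eq]
    have hlenB := pv_runs_len xs
    have hm4 := pv_runs_mem xs 4
    have hm3 := pv_runs_mem xs 3
    have ha4 := pv_anyA xs 4
    have ha3 := pv_anyA xs 3
    norm_num at hm4 hm3
    by_cases hs1 : PySem.List.sorted xs (fun x => x) false = [2, 3, 4, 5, 6]
    · rw [hs1, (by simp [pvRuns] : pvRuns ([2,3,4,5,6] : List Int) = [1,1,1,1,1])]; decide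
    · by_cases hs2 : PySem.List.sorted xs (fun x => x) false = [1, 2, 3, 4, 5]
      · rw [hs2, (by simp [pvRuns] : pvRuns ([1,2,3,4,5] : List Int) = [1,1,1,1,1])]; decide
      · simp only [hlenA, hlenB, ha4, ha3, hs1, hs2, if_false,
          beq_iff_eq, Bool.and_eq_true]
        by_cases h4 : ∃ x ∈ xs, List.count x xs = 4 <;>
          by_cases h3 : ∃ x ∈ xs, List.count x xs = 3 <;>
            simp only [h4, h3, if_false, and_true, and_false] <;>
              split_ifs <;> first | rfl | omega | simp_all
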